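-- pv_equiv track=rewrite | github.com/tlgs/aoc-2023 | 14.py | part_one
-- ===== SOURCE A (Python) =====
-- def part_one(platform):
--     platform = [inner[:] for inner in platform]
--
--     total, ymax = 0, len(platform)
--     for y, row in enumerate(platform):
--         for x, c in enumerate(row):
--             if c != "O":
--                 continue
--
--             i = y - 1
--             while i >= 0 and platform[i][x] == ".":
--                 i -= 1
--
--             platform[y][x] = "."
--             platform[i + 1][x] = "O"
--
--             total += ymax - (i + 1)
--
--     return total
-- ===== SOURCE B (Python) =====
-- def part_one(platform):
--     ymax = len(platform)
--     width = max(map(len, platform), default=0)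
--     total = 0
--     for x in range(width):
--         nxt = 0
--         for y, row in enumerate(platform):
--             if x < len(row):
--                 c = row[x]
--                 if c == "O":
--                     total += ymax - nxt
--                     nxt += 1
--                 elif c != ".":
--                     nxt = y + 1
--     return total
-- ===== Notes on version B (the rewrite author's own statement) =====
-- stated objective: alternative
-- what changed: A rolls each rock with an upward while-scan over a mutated copy of the grid; B never mutates: it does one column-major pass keeping a next-free-landing-row counter per column and summing loads directly.
import Mathlib
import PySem

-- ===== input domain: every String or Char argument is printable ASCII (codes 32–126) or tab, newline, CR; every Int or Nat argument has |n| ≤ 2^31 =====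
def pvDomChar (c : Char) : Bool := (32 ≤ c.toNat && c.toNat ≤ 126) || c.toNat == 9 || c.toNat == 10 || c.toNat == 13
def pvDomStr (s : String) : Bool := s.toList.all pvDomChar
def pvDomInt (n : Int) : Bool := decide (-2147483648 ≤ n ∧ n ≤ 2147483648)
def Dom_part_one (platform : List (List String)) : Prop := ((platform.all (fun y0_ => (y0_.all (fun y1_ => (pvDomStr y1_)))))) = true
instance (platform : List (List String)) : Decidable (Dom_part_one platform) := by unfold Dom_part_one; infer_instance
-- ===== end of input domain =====

-- B replaces A's per-rock upward while-scan over a mutated grid by one column-major pass that keeps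
-- the next free landing row per column; equality of the return values is proved on Pre_ (the inputs
-- where A does not raise).  A copies its argument, so neither program mutates the caller's list.

-- ===== PORT A =====
-- reads platform[y][x]; the default "" is only reached where Python A would raise IndexError (excluded by Pre_)
def pvCell (p : List (List String)) (y x : Nat) : String := (p.getD y []).getD x ""

-- Python's `i = y - 1; while i >= 0 and platform[i][x] == ".": i -= 1`, returning i+1 (the landing row)
def pvScan (p : List (List String)) (x : Nat) : Nat → Nat
  | 0 => 0
  | i+1 => if pvCell p i x = "." then pvScan p x i else i + 1

-- `platform[y][x] = v`
def pvSet (p : List (List String)) (y x : Nat) (v : String) : List (List String) :=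
  p.modify y (fun row => row.set x v)

-- body of A's inner loop at cell (y, x); state = (mutated platform, total)
def pvStepA (ymax y : Nat) (st : List (List String) × Int) (x : Nat) : List (List String) × Int :=
  let c := pvCell st.1 y x
  if c ≠ "O" then st
  else
    let i := pvScan st.1 x y
    (pvSet (pvSet st.1 y x ".") i x "O", st.2 + ((ymax : Int) - (i : Int)))

def part_one (platform : List (List String)) : Int :=
  let ymax := platform.length
  ((List.range ymax).foldl (fun st y =>
      (List.range ((st.1.getD y []).length)).foldl (pvStepA ymax y) st) (platform, 0)).2

-- ===== PORT B =====
-- body of B's inner loop over enumerate(platform) for a fixed column x; state = (nxt, total)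
def pvColStep (ymax x : Nat) (st : Int × Int) (yr : Int × List String) : Int × Int :=
  if x < yr.2.length then
    let c := yr.2.getD x ""
    if c = "O" then (st.1 + 1, st.2 + ((ymax : Int) - st.1))
    else if c ≠ "." then (yr.1 + 1, st.2)
    else st
  else st

def part_one_alt (platform : List (List String)) : Int :=
  let ymax := platform.length
  let width := (platform.map List.length).foldl max 0
  (List.range width).foldl (fun total x =>
      ((PySem.List.enumerate platform).foldl (pvColStep ymax x) (0, total)).2) 0

-- ===== PRECONDITION & SPEC =====
-- Pre_ excludes exactly the inputs on which Python A raises IndexError: those where some rock "O" at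
-- (m, x) sees only "." cells in its column strictly between it and some higher row h that is too
-- short to have a column x, so the upward scan runs off the short row.
def Pre_part_one (platform : List (List String)) : Prop :=
  ∀ m < platform.length, ∀ x < (platform.getD m []).length, ∀ h < m,
    (platform.getD m []).getD x "" = "O" →
    (platform.getD h []).length ≤ x →
    ∃ j < m, h < j ∧ ((platform.getD j []).length ≤ x ∨ (platform.getD j []).getD x "" ≠ ".")

instance (platform : List (List String)) : Decidable (Pre_part_one platform) := by
  unfold Pre_part_one
  refine @Nat.decidableBallLT _ _ (fun m hm => ?_)
  refine @Nat.decidableBallLT _ _ (fun x hx => ?_)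
  refine @Nat.decidableBallLT _ _ (fun h hh => ?_)
  infer_instance

def pvWitness_part_one : List (List String) := [["O", "."], [".", "#"], ["O", "O"]]

def Spec_part_one (platform : List (List String)) (out : Int) : Prop := out = part_one_alt platform
instance (platform : List (List String)) (out : Int) : Decidable (Spec_part_one platform out) := by
  unfold Spec_part_one; infer_instance

-- ===== CLAIM (what is proved, stated in full; the proofs are below) =====
def Claim_equal_part_one : Prop := ∀ (platform : List (List String)), Dom_part_one platform → Pre_part_one platform → Spec_part_one platform (part_one platform)

-- ===== LEMMAS AND PROOFS =====

-- row length of the original platform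
def oLen (pf : List (List String)) (j : Nat) : Nat := (pf.getD j []).length

-- B's `nxt` for column x after the first y rows, computed from the original platform
def bst (pf : List (List String)) (x : Nat) : Nat → Nat
  | 0 => 0
  | y+1 => if x < oLen pf y then
      (if pvCell pf y x = "O" then bst pf x y + 1
       else if pvCell pf y x = "." then bst pf x y else y + 1)
    else bst pf x y

-- B's partial total for column x after the first y rows
def btot (pf : List (List String)) (x : Nat) : Nat → Int
  | 0 => 0
  | y+1 => if x < oLen pf y ∧ pvCell pf y x = "O" then
      btot pf x y + ((pf.length : Int) - (bst pf x y : Int))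
    else btot pf x y

-- width = max(map(len, platform), default=0)
def pvW (pf : List (List String)) : Nat := (pf.map List.length).foldl max 0

-- state of column x of A's mutated platform p after Y rows have been processed
def cinv (pf p : List (List String)) (x Y : Nat) : Prop :=
  (∀ j, Y ≤ j → pvCell p j x = pvCell pf j x) ∧
  (∀ j, bst pf x Y ≤ j → j < Y → x < oLen pf j → pvCell p j x = ".") ∧
  (0 < bst pf x Y → x < oLen pf (bst pf x Y - 1) ∧ pvCell p (bst pf x Y - 1) x ≠ ".")

-- A's total after processing all rows < y and the cells < x of row y
def msum (pf : List (List String)) (y x : Nat) : Int :=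
  ∑ x' ∈ Finset.range (pvW pf), if x' < x then btot pf x' (y+1) else btot pf x' y

-- full invariant of A's fold state at cell (y, x)
def ginv (pf : List (List String)) (y x : Nat) (st : List (List String) × Int) : Prop :=
  st.1.length = pf.length ∧ (∀ j, oLen st.1 j = oLen pf j) ∧
  (∀ x', x' < x → cinv pf st.1 x' (y+1)) ∧ (∀ x', x ≤ x' → cinv pf st.1 x' y) ∧
  st.2 = msum pf y x

lemma bst_le (pf : List (List String)) (x : Nat) : ∀ y, bst pf x y ≤ y := by
  intro y
  induction y with
  | zero => simp [bst]
  | succ y ih => unfold bst; split_ifs <;> omega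

lemma bst_mono (pf : List (List String)) (x : Nat) {y y' : Nat} (h : y ≤ y') :
    bst pf x y ≤ bst pf x y' := by
  induction y' with
  | zero =>
    have : y = 0 := by omega
    subst this; exact le_rfl
  | succ y' ih =>
    rcases Nat.lt_or_ge y (y'+1) with hlt | hge
    · have h1 : bst pf x y ≤ bst pf x y' := ih (by omega)
      have h2 := bst_le pf x y'
      have h3 := bst_le pf x y
      conv_rhs => rw [bst]
      split_ifs <;> omega
    · have : y = y' + 1 := by omega
      subst this; exact le_rfl

lemma le_foldl_max (l : List Nat) (i : Nat) : i ≤ l.foldl max i := by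
  induction l generalizing i with
  | nil => simp
  | cons a l ih => exact le_trans (Nat.le_max_left i a) (ih _)

lemma mem_le_foldl_max {a : Nat} {l : List Nat} (h : a ∈ l) (i : Nat) : a ≤ l.foldl max i := by
  induction l generalizing i with
  | nil => simp at h
  | cons b l ih =>
    rcases List.mem_cons.mp h with rfl | hm
    · exact le_trans (Nat.le_max_right i a) (le_foldl_max _ _)
    · exact ih hm _

lemma oLen_le_W {pf : List (List String)} {y : Nat} (h : y < pf.length) : oLen pf y ≤ pvW pf := by
  have hmem : oLen pf y ∈ pf.map List.length := by
    simp only [oLen, List.getD_eq_getElem?_getD, List.getElem?_eq_getElem h]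
    exact List.mem_map.mpr ⟨pf[y], List.getElem_mem h, rfl⟩
  exact mem_le_foldl_max hmem 0

lemma length_pvSet (p : List (List String)) (y x : Nat) (v : String) :
    (pvSet p y x v).length = p.length := by
  simp [pvSet]

lemma oLen_pvSet (p : List (List String)) (y x : Nat) (v : String) (j : Nat) :
    oLen (pvSet p y x v) j = oLen p j := by
  simp only [oLen, pvSet, List.getD_eq_getElem?_getD, List.getElem?_modify]
  cases p[j]? with
  | none => rfl
  | some row => by_cases hy : y = j <;> simp [hy]

lemma pvCell_pvSet_ne (p : List (List String)) {y x : Nat} {v : String} {j x' : Nat}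
    (h : j ≠ y ∨ x' ≠ x) : pvCell (pvSet p y x v) j x' = pvCell p j x' := by
  simp only [pvCell, pvSet, List.getD_eq_getElem?_getD, List.getElem?_modify]
  cases p[j]? with
  | none => rfl
  | some row =>
    by_cases hy : y = j
    · subst hy
      rcases h with h | h
    -- j ≠ y case is impossible here
      · exact absurd rfl h
      · simp [Ne.symm h]
    · simp [hy]

lemma pvCell_pvSet_self (p : List (List String)) {y x : Nat} {v : String}
    (hy : y < p.length) (hx : x < oLen p y) : pvCell (pvSet p y x v) y x = v := by
  have hrow : p.getD y [] = p[y] := by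
    simp [List.getD_eq_getElem?_getD, List.getElem?_eq_getElem hy]
  simp only [oLen, hrow] at hx
  simp only [pvCell, pvSet, List.getD_eq_getElem?_getD, List.getElem?_modify,
    List.getElem?_eq_getElem hy]
  simp [hx]

-- under Pre_, the scan for a rock at (m, x) never meets a too-short row
lemma noHole {pf : List (List String)} (hpre : Pre_part_one pf) :
    ∀ m, m < pf.length → ∀ x, x < oLen pf m → pvCell pf m x = "O" →
    ∀ h, bst pf x m ≤ h → h < m → x < oLen pf h := by
  intro m
  induction m using Nat.strong_induction_on with
  | _ m IHm =>
  intro hm x hx hO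
  suffices H : ∀ k h, m - h ≤ k → bst pf x m ≤ h → h < m → x < oLen pf h by
    intro h hb hh; exact H (m - h) h le_rfl hb hh
  intro k
  induction k with
  | zero => intro h hk hb hh; omega
  | succ k IHk =>
    intro h hk hb hh
    by_contra hole
    have hhole : (pf.getD h []).length ≤ x := by
      simpa [oLen] using hole
    obtain ⟨j, hjm, hhj, hcase⟩ := hpre m hm x hx h hh hO hhole
    rcases hcase with hj_hole | hj_ne
    · -- row j is also too short: recurse on the higher hole j
      have : x < oLen pf j := IHk j (by omega) (by omega) hjm
      simp only [oLen] at this; omega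
    · -- cell (j, x) exists and is not "."
      have hjlen : x < oLen pf j := by
        by_contra hshort
        have : x < oLen pf j := IHk j (by omega) (by omega) hjm
        exact hshort this
      by_cases hOj : pvCell pf j x = "O"
      · -- a rock at j: apply the outer induction hypothesis at j
        have := IHm j hjm (by omega) x hjlen hOj h
          (le_trans (bst_mono pf x (le_of_lt hjm)) hb) hhj
        simp only [oLen] at this hhole; omega
      · -- a blocker at j: bst jumps above h, contradiction
        have hbl : bst pf x (j+1) = j + 1 := by
          rw [bst]
          simp only [hjlen, if_true]
          have : pvCell pf j x ≠ "." := by simpa [pvCell, oLen] using hj_ne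
          simp [hOj, this]
        have := bst_mono pf x (show j + 1 ≤ m by omega)
        omega
  

lemma scan_eq {p : List (List String)} {x : Nat} :
    ∀ {Y L : Nat}, L ≤ Y → (∀ j, L ≤ j → j < Y → pvCell p j x = ".") →
    (L = 0 ∨ pvCell p (L-1) x ≠ ".") → pvScan p x Y = L := by
  intro Y
  induction Y with
  | zero => intro L hL _ _; interval_cases L; rfl
  | succ Y IH =>
    intro L hL hdots hbase
    rcases Nat.lt_or_ge L (Y+1) with hlt | hge
    · have : pvCell p Y x = "." := hdots Y (by omega) (by omega)
      rw [pvScan]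
      simp only [this, if_true]
      exact IH (by omega) (fun j h1 h2 => hdots j h1 (by omega)) hbase
    · have hEq : L = Y + 1 := by omega
      subst hEq
      rcases hbase with h0 | hne
      · omega
      · rw [pvScan]
        simp only [Nat.add_sub_cancel] at hne
        simp [hne]

lemma msum_step {pf : List (List String)} {x : Nat} (hx : x < pvW pf) (y : Nat) :
    msum pf y (x+1) = msum pf y x + (btot pf x (y+1) - btot pf x y) := by
  unfold msum
  have hpt : ∀ x' ∈ Finset.range (pvW pf),
      (if x' < x + 1 then btot pf x' (y+1) else btot pf x' y)
        = (if x' < x then btot pf x' (y+1) else btot pf x' y)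
          + (if x' = x then btot pf x (y+1) - btot pf x y else 0) := by
    intro x' _
    by_cases h1 : x' < x
    · rw [if_pos h1, if_pos (Nat.lt_succ_of_lt h1), if_neg (by omega : ¬ x' = x), add_zero]
    · by_cases h2 : x' = x
      · subst h2; simp
      · rw [if_neg (by omega : ¬ x' < x + 1), if_neg h1, if_neg h2, add_zero]
  rw [Finset.sum_congr rfl hpt, Finset.sum_add_distrib, Finset.sum_ite_eq' (Finset.range (pvW pf))]
  simp [Finset.mem_range.mpr hx]

lemma msum_rowend {pf : List (List String)} {y x : Nat}
    (h : ∀ x', x ≤ x' → ¬ x' < oLen pf y) : msum pf y x = msum pf (y+1) 0 := by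
  unfold msum
  refine Finset.sum_congr rfl fun x' _ => ?_
  by_cases h1 : x' < x
  · simp [h1]
  · have hb : btot pf x' (y+1) = btot pf x' y := by
      rw [btot]
      simp [h x' (by omega)]
    simp [h1, hb]

lemma step_ginv {pf : List (List String)} (hpre : Pre_part_one pf) {y x : Nat}
    (hy : y < pf.length) (hx : x < oLen pf y) {st : List (List String) × Int}
    (H : ginv pf y x st) : ginv pf y (x+1) (pvStepA pf.length y st x) := by
  obtain ⟨hlen, holen, hlo, hhi, htot⟩ := H
  obtain ⟨cu, cs, cb⟩ := hhi x le_rfl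
  have ceq : pvCell st.1 y x = pvCell pf y x := cu y le_rfl
  have hxW : x < pvW pf := lt_of_lt_of_le hx (oLen_le_W hy)
  have hyl : y < st.1.length := by rw [hlen]; exact hy
  by_cases hO : pvCell pf y x = "O"
  · -- a rock rolls: A's scan lands exactly at bst pf x y
    have hLy := bst_le pf x y
    have hnoh : ∀ j, bst pf x y ≤ j → j < y → x < oLen pf j := noHole hpre y hy x hx hO
    have hdots : ∀ j, bst pf x y ≤ j → j < y → pvCell st.1 j x = "." :=
      fun j h1 h2 => cs j h1 h2 (hnoh j h1 h2)
    have hbase : bst pf x y = 0 ∨ pvCell st.1 (bst pf x y - 1) x ≠ "." := by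
      rcases Nat.eq_zero_or_pos (bst pf x y) with h0 | hpos
      · exact Or.inl h0
      · exact Or.inr (cb hpos).2
    have hscan : pvScan st.1 x y = bst pf x y := scan_eq hLy hdots hbase
    have hxLpf : x < oLen pf (bst pf x y) := by
      rcases Nat.lt_or_ge (bst pf x y) y with h | h
      · exact hnoh _ le_rfl h
      · have hEq : bst pf x y = y := by omega
        rw [hEq]; exact hx
    have hLl : bst pf x y < st.1.length := by omega
    have hstep : pvStepA pf.length y st x
        = (pvSet (pvSet st.1 y x ".") (bst pf x y) x "O",
           st.2 + ((pf.length : Int) - (bst pf x y : Int))) := by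
      simp only [pvStepA, ceq, hO, hscan]
      simp
    rw [hstep]
    have hlen1 : (pvSet st.1 y x ".").length = st.1.length := length_pvSet _ _ _ _
    have holen1 : ∀ j, oLen (pvSet st.1 y x ".") j = oLen st.1 j :=
      fun j => oLen_pvSet _ _ _ _ j
    have hcell_ne : ∀ j x', x' ≠ x →
        pvCell (pvSet (pvSet st.1 y x ".") (bst pf x y) x "O") j x' = pvCell st.1 j x' := by
      intro j x' hne
      rw [pvCell_pvSet_ne _ (Or.inr hne), pvCell_pvSet_ne _ (Or.inr hne)]
    have hcell_nj : ∀ j, j ≠ y → j ≠ bst pf x y →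
        pvCell (pvSet (pvSet st.1 y x ".") (bst pf x y) x "O") j x = pvCell st.1 j x := by
      intro j h1 h2
      rw [pvCell_pvSet_ne _ (Or.inl h2), pvCell_pvSet_ne _ (Or.inl h1)]
    have hcellL : pvCell (pvSet (pvSet st.1 y x ".") (bst pf x y) x "O") (bst pf x y) x = "O" := by
      refine pvCell_pvSet_self _ (by rw [hlen1]; exact hLl) ?_
      rw [holen1, holen]; exact hxLpf
    have hcelly : y ≠ bst pf x y →
        pvCell (pvSet (pvSet st.1 y x ".") (bst pf x y) x "O") y x = "." := by
      intro hne
      rw [pvCell_pvSet_ne _ (Or.inl hne)]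
      exact pvCell_pvSet_self st.1 hyl (by rw [holen]; exact hx)
    have hbsucc : bst pf x (y+1) = bst pf x y + 1 := by
      rw [bst]; simp [hx, hO]
    have hbtsucc : btot pf x (y+1) = btot pf x y + ((pf.length : Int) - (bst pf x y : Int)) := by
      rw [btot]; simp [hx, hO]
    refine ⟨by simpa [length_pvSet] using hlen,
      fun j => by rw [oLen_pvSet, oLen_pvSet]; exact holen j, ?_, ?_, ?_⟩
    · -- columns x' ≤ x are now in state y+1
      intro x' hx'
      rcases Nat.lt_or_ge x' x with hlt | hge
      · obtain ⟨du, ds, db⟩ := hlo x' hlt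
        have hne : x' ≠ x := by omega
        exact ⟨fun j hj => by rw [hcell_ne j x' hne]; exact du j hj,
          fun j h1 h2 h3 => by rw [hcell_ne j x' hne]; exact ds j h1 h2 h3,
          fun hpos => ⟨(db hpos).1, by rw [hcell_ne _ x' hne]; exact (db hpos).2⟩⟩
      · have hEq : x' = x := by omega
        subst hEq
        refine ⟨?_, ?_, ?_⟩
        · intro j hj
          rw [hcell_nj j (by omega) (by omega)]
          exact cu j (by omega)
        · intro j h1 h2 h3
          rw [hbsucc] at h1
          rcases Nat.lt_or_ge j y with hjy | hjy
          · rw [hcell_nj j (by omega) (by omega)]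
            exact cs j (by omega) hjy h3
          · have hEq : j = y := by omega
            subst hEq
            exact hcelly (by omega)
        · intro _
          rw [hbsucc]
          simp only [Nat.add_sub_cancel]
          exact ⟨hxLpf, by rw [hcellL]; decide⟩
    · -- columns x' > x untouched, still in state y
      intro x' hx'
      obtain ⟨du, ds, db⟩ := hhi x' (by omega)
      have hne : x' ≠ x := by omega
      exact ⟨fun j hj => by rw [hcell_ne j x' hne]; exact du j hj,
        fun j h1 h2 h3 => by rw [hcell_ne j x' hne]; exact ds j h1 h2 h3,
        fun hpos => ⟨(db hpos).1, by rw [hcell_ne _ x' hne]; exact (db hpos).2⟩⟩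
    · -- the running total
      show st.2 + ((pf.length : Int) - (bst pf x y : Int)) = msum pf y (x+1)
      rw [msum_step hxW y, hbtsucc, htot]; ring
  · -- no rock at (y, x): the state is unchanged
    have hstep : pvStepA pf.length y st x = st := by
      simp only [pvStepA, ceq]
      simp [hO]
    rw [hstep]
    have hbsame : ¬ (x < oLen pf y ∧ pvCell pf y x = "O") := by tauto
    have hbtsucc : btot pf x (y+1) = btot pf x y := by rw [btot]; simp [hbsame]
    refine ⟨hlen, holen, ?_, fun x' hx' => hhi x' (by omega), ?_⟩
    · intro x' hx'
      rcases Nat.lt_or_ge x' x with hlt | hge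
      · exact hlo x' hlt
      · have hEq : x' = x := by omega
        subst hEq
        by_cases hdot : pvCell pf y x' = "."
        · have hbs : bst pf x' (y+1) = bst pf x' y := by
            rw [bst]; simp [hx, hdot]
          refine ⟨fun j hj => cu j (by omega), ?_, by rw [hbs]; exact cb⟩
          intro j h1 h2 h3
          rw [hbs] at h1
          rcases Nat.lt_or_ge j y with hjy | hjy
          · exact cs j h1 hjy h3
          · have hEq : j = y := by omega
            subst hEq
            rw [ceq]; exact hdot
        · have hbs : bst pf x' (y+1) = y + 1 := by
            rw [bst]; simp [hx, hO, hdot]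
          refine ⟨fun j hj => cu j (by omega), ?_, ?_⟩
          · intro j h1 h2 h3
            rw [hbs] at h1
            exact absurd h1 (by omega)
          · intro _
            rw [hbs]
            simp only [Nat.add_sub_cancel]
            exact ⟨hx, by rw [ceq]; exact hdot⟩
    · rw [msum_step hxW y, hbtsucc, htot]; ring

lemma row_ginv {pf : List (List String)} (hpre : Pre_part_one pf) {y : Nat}
    (hy : y < pf.length) {st : List (List String) × Int} (H : ginv pf y 0 st) :
    ∀ k, k ≤ oLen pf y → ginv pf y k ((List.range k).foldl (pvStepA pf.length y) st) := by
  intro k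
  induction k with
  | zero => intro _; simpa using H
  | succ k IH =>
    intro hk
    rw [List.range_succ, List.foldl_append, List.foldl_cons, List.foldl_nil]
    exact step_ginv hpre hy (by omega) (IH (by omega))

lemma rowend_ginv {pf : List (List String)} {y : Nat} {st : List (List String) × Int}
    (H : ginv pf y (oLen pf y) st) : ginv pf (y+1) 0 st := by
  obtain ⟨hlen, holen, hlo, hhi, htot⟩ := H
  refine ⟨hlen, holen, fun x' hx' => absurd hx' (by omega), ?_, ?_⟩
  · intro x' _
    rcases Nat.lt_or_ge x' (oLen pf y) with h | h
    · exact hlo x' h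
    · obtain ⟨du, ds, db⟩ := hhi x' h
      have hbs : bst pf x' (y+1) = bst pf x' y := by
        rw [bst]; simp [show ¬ x' < oLen pf y by omega]
      refine ⟨fun j hj => du j (by omega), ?_, by rw [hbs]; exact db⟩
      intro j h1 h2 h3
      rw [hbs] at h1
      rcases Nat.lt_or_ge j y with hjy | hjy
      · exact ds j h1 hjy h3
      · have hEq : j = y := by omega
        subst hEq
        exact absurd h3 (by omega)
  · exact htot.trans (msum_rowend (fun x' hx'' => by omega))

lemma outer_ginv {pf : List (List String)} (hpre : Pre_part_one pf) :
    ∀ y, y ≤ pf.length → ginv pf y 0 ((List.range y).foldl (fun st y' =>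
      (List.range ((st.1.getD y' []).length)).foldl (pvStepA pf.length y') st) (pf, 0)) := by
  intro y
  induction y with
  | zero =>
    intro _
    refine ⟨rfl, fun j => rfl, fun x' hx' => absurd hx' (by omega), ?_, ?_⟩
    · exact fun x' _ => ⟨fun j _ => rfl, fun j h1 h2 h3 => absurd h2 (by omega),
        fun h => absurd h (by simp [bst])⟩
    · show (0 : Int) = msum pf 0 0
      simp [msum, btot]
  | succ y IH =>
    intro hy1
    have hy : y < pf.length := by omega
    rw [List.range_succ, List.foldl_append, List.foldl_cons, List.foldl_nil]
    have Hy := IH (by omega)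
    have hL : (((List.range y).foldl (fun st y' =>
        (List.range ((st.1.getD y' []).length)).foldl (pvStepA pf.length y') st) (pf, 0)).1.getD y []).length
        = oLen pf y := Hy.2.1 y
    rw [hL]
    exact rowend_ginv (row_ginv hpre hy Hy (oLen pf y) le_rfl)

lemma colB (pf : List (List String)) (x : Nat) :
    ∀ y, y ≤ pf.length → ∀ t : Int,
      (PySem.List.enumerate (pf.take y)).foldl (pvColStep pf.length x) (0, t)
        = ((bst pf x y : Int), t + btot pf x y) := by
  intro y
  induction y with
  | zero => intro _ t; simp [bst, btot]
  | succ y IH =>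
    intro hy t
    have hyl : y < pf.length := by omega
    have hget : pf[y]? = some (pf.getD y []) := by
      simp [List.getD_eq_getElem?_getD, List.getElem?_eq_getElem hyl]
    have htake : pf.take (y+1) = pf.take y ++ [pf.getD y []] := by
      rw [List.take_add_one, hget]; rfl
    have hlen_take : (pf.take y).length = y := by
      rw [List.length_take]; omega
    rw [htake, PySem.List.enumerate_append, List.foldl_append, IH (by omega) t, hlen_take]
    show pvColStep pf.length x ((bst pf x y : Int), t + btot pf x y) ((0 : Int) + (y : Int), pf.getD y []) = _
    unfold pvColStep
    simp only [zero_add]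
    by_cases hxl : x < (pf.getD y []).length
    · have hxo : x < oLen pf y := hxl
      rw [if_pos hxl]
      by_cases hOc : (pf.getD y []).getD x "" = "O"
      · have hOc' : pvCell pf y x = "O" := hOc
        rw [if_pos hOc, bst, btot, if_pos hxo, if_pos hOc',
          if_pos (⟨hxo, hOc'⟩ : x < oLen pf y ∧ pvCell pf y x = "O")]
        simp only [Prod.mk.injEq]
        exact ⟨by push_cast; ring, by ring⟩
      · have hOc' : ¬ pvCell pf y x = "O" := hOc
        rw [if_neg hOc]
        by_cases hdot : (pf.getD y []).getD x "" = "."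
        · have hdot' : pvCell pf y x = "." := hdot
          rw [if_neg (not_not_intro hdot), bst, btot, if_pos hxo, if_neg hOc', if_pos hdot',
            if_neg (fun h => hOc' h.2)]
        · have hdot' : ¬ pvCell pf y x = "." := hdot
          rw [if_pos hdot, bst, btot, if_pos hxo, if_neg hOc', if_neg hdot',
            if_neg (fun h => hOc' h.2)]
          simp only [Prod.mk.injEq]
          exact ⟨by push_cast; ring, trivial⟩
    · rw [if_neg hxl]
      have hxo : ¬ x < oLen pf y := hxl
      rw [bst, btot]
      simp [hxo]

lemma altB (pf : List (List String)) :
    part_one_alt pf = ∑ x ∈ Finset.range (pvW pf), btot pf x pf.length := by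
  have htake : pf.take pf.length = pf := List.take_length
  have hcol : ∀ (t : Int) (x : Nat),
      ((PySem.List.enumerate pf).foldl (pvColStep pf.length x) (0, t)).2
        = t + btot pf x pf.length := by
    intro t x
    have h := colB pf x pf.length le_rfl t
    rw [htake] at h
    rw [h]
  have aux : ∀ k, (List.range k).foldl (fun total x =>
      ((PySem.List.enumerate pf).foldl (pvColStep pf.length x) (0, total)).2) 0
        = ∑ x ∈ Finset.range k, btot pf x pf.length := by
    intro k
    induction k with
    | zero => simp
    | succ k IH =>
      rw [List.range_succ, List.foldl_append, List.foldl_cons, List.foldl_nil, IH,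
        hcol, Finset.sum_range_succ]
  exact aux (pvW pf)

-- ===== VERDICT (by name: the statement is the Claim_ definition above) =====
theorem part_one_spec : Claim_equal_part_one := by
  intro pf _ hpre
  unfold Spec_part_one
  have G := outer_ginv hpre pf.length le_rfl
  have h1 : part_one pf = msum pf pf.length 0 := G.2.2.2.2
  have h2 : msum pf pf.length 0 = ∑ x ∈ Finset.range (pvW pf), btot pf x pf.length := by
    unfold msum
    exact Finset.sum_congr rfl fun x' _ => by simp
  rw [h1, h2, altB]
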